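-- pv_equiv track=rewrite | github.com/ssrg-vt/DynaCut | criu_modified/lib/py/disasm_pages.py | findOffset
-- ===== SOURCE A (Python) =====
-- def findOffset(mm_list, pgmap_list):
--     pg_offset = 0
--     for index in range(len(mm_list)):
--         for key in mm_list[index]:
--             if(key == "mm_start_code"):
--                 code_vma_start = mm_list[index][key]
--             if(key == "mm_end_code"):
--                 code_vma_end = mm_list[index][key]
--
--     for i in range(1, len(pgmap_list)):
--         pages = pgmap_list[i]["nr_pages"]
--         for key in pgmap_list[i]:
--             if(key == "vaddr"):
--                 map_address = pgmap_list[i][key]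
--                 if(code_vma_start <= map_address < code_vma_end):
--                     code_offset = pg_offset
--                 break
--         pg_offset = pg_offset + (4096 * pages)
--
--     return code_offset, code_vma_start, code_vma_end
-- ===== SOURCE B (Python) =====
-- def findOffset(mm_list, pgmap_list):
--     # backward scans: first match from the end is A's last-overwrite winner;
--     # the page-offset sum is computed once, only for the winning map
--     for m in reversed(mm_list):
--         if "mm_start_code" in m:
--             code_vma_start = m["mm_start_code"]
--             break
--     for m in reversed(mm_list):
--         if "mm_end_code" in m:
--             code_vma_end = m["mm_end_code"]
--             break
--     for i in range(len(pgmap_list) - 1, 0, -1):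
--         pm = pgmap_list[i]
--         if "vaddr" in pm and code_vma_start <= pm["vaddr"] < code_vma_end:
--             code_offset = 4096 * sum(pgmap_list[j]["nr_pages"] for j in range(1, i))
--             break
--     return code_offset, code_vma_start, code_vma_end
-- ===== Notes on version B (the rewrite author's own statement) =====
-- stated objective: alternative
-- what changed: Replaces A's forward pass with running pg_offset accumulator and overwrite-on-match locals by backward first-match scans: the vma bounds are the first hits over reversed(mm_list), the code map is the first in-range vaddr scanning pgmap_list from the end, and its offset is computed once as a direct sum over the preceding maps; missing keys / no match still raise.
import Mathlib
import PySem

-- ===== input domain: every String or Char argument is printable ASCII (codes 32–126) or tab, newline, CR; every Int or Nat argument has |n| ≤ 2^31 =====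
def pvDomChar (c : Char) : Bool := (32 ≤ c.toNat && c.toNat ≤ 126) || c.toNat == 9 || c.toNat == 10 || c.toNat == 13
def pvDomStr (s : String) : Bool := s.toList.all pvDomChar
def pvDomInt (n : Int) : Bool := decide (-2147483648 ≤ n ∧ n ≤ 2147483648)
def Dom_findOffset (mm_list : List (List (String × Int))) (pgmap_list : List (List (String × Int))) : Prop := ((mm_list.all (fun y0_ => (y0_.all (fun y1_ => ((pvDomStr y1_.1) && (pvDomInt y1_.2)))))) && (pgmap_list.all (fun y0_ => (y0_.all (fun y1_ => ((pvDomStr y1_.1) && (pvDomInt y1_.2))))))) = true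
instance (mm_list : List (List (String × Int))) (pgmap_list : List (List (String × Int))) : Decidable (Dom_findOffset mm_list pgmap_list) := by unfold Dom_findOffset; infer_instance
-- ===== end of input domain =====

-- B replaces A's forward pass (running pg_offset, overwrite-on-match locals) by backward
-- first-match scans with a one-shot offset sum; same cost, equal return value on every
-- input where A returns (Pre_ excludes A's exceptions).

-- ===== PORT A =====
-- Python dicts arrive as association lists; a dict's key view is the distinct keys in first
-- occurrence order and d[k] is the FIRST binding (the tester's convention).
def pyKeys (d : List (String × Int)) : List String := (d.map Prod.fst).dedup

-- inner 'for key in mm_list[index]' loop of A (two independent overwrite-ifs)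
def mmScan (d : List (String × Int)) (st : Option Int × Option Int) : Option Int × Option Int :=
  (pyKeys d).foldl (fun st key =>
    (if key == "mm_start_code" then d.lookup key else st.1,
     if key == "mm_end_code" then d.lookup key else st.2)) st

-- inner 'for key in pgmap_list[i]' loop of A, with its break at the first "vaddr" key;
-- the 'none' match arms are the unbound code_vma_start/end locals, excluded by Pre_
def vaddrScan (d : List (String × Int)) (cvs cve : Option Int) (pg : Int) (co : Option Int) :
    List String → Option Int
  | [] => co
  | k :: ks =>
    if k == "vaddr" then
      match d.lookup k, cvs, cve with
      | some a, some s, some e => if s ≤ a ∧ a < e then some pg else co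
      | _, _, _ => co
    else vaddrScan d cvs cve pg co ks

def findOffset (mm_list : List (List (String × Int))) (pgmap_list : List (List (String × Int))) : Int × Int × Int :=
  let se := mm_list.foldl (fun st d => mmScan d st) (none, none)
  let fin := (pgmap_list.drop 1).foldl (fun (st : Int × Option Int) d =>
      let pages := (d.lookup "nr_pages").getD 0   -- none = KeyError, excluded by Pre_
      let co := vaddrScan d se.1 se.2 st.1 st.2 (pyKeys d)
      (st.1 + 4096 * pages, co)) (0, none)
  -- getD 0: a 'none' here is Python's UnboundLocalError, excluded by Pre_
  (fin.2.getD 0, se.1.getD 0, se.2.getD 0)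

-- ===== PORT B =====
-- 'for m in reversed(ms): if key in m: x = m[key]; break' (none = B's NameError, excluded by Pre_)
def firstKey : List (List (String × Int)) → String → Option Int
  | [], _ => none
  | m :: ms, key => if (m.map Prod.fst).contains key then m.lookup key else firstKey ms key

-- 'for i in range(len(pg)-1, 0, -1): …' — first in-range vaddr from the end; on the hit,
-- 'code_offset = 4096 * sum(pg[j]["nr_pages"] for j in range(1, i))' computed once
def scanB (pg : List (List (String × Int))) (s e : Int) : Nat → Option Int
  | 0 => none
  | i + 1 =>
    let pm := (pg[i + 1]?).getD []
    match pm.lookup "vaddr" with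
    | some v =>
        if s ≤ v ∧ v < e then
          some (4096 * (((pg.drop 1).take i).map (fun d => (d.lookup "nr_pages").getD 0)).sum)
        else scanB pg s e i
    | none => scanB pg s e i

def findOffset_alt (mm_list : List (List (String × Int))) (pgmap_list : List (List (String × Int))) : Int × Int × Int :=
  let code_vma_start := (firstKey mm_list.reverse "mm_start_code").getD 0
  let code_vma_end := (firstKey mm_list.reverse "mm_end_code").getD 0
  let code_offset := (scanB pgmap_list code_vma_start code_vma_end (pgmap_list.length - 1)).getD 0
  (code_offset, code_vma_start, code_vma_end)

-- ===== PRECONDITION & SPEC =====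
-- last binding of key over the list of dicts (what A's overwrite loop leaves behind)
def lastLookup (key : String) (ds : List (List (String × Int))) : Option Int :=
  (ds.filterMap (·.lookup key)).getLast?

def vaddrHit (s e : Int) (d : List (String × Int)) : Bool :=
  match d.lookup "vaddr" with
  | some v => decide (s ≤ v ∧ v < e)
  | none => false

-- Pre_ = exactly where A returns: both vma bounds bound, every pgmap dict past the first has
-- "nr_pages", and some of them has an in-range "vaddr" (else UnboundLocalError / KeyError).
def Pre_findOffset (mm_list : List (List (String × Int))) (pgmap_list : List (List (String × Int))) : Prop :=
  (lastLookup "mm_start_code" mm_list).isSome = true ∧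
  (lastLookup "mm_end_code" mm_list).isSome = true ∧
  ((pgmap_list.drop 1).all (fun d => (d.map Prod.fst).contains "nr_pages")) = true ∧
  ((pgmap_list.drop 1).any (vaddrHit ((lastLookup "mm_start_code" mm_list).getD 0)
      ((lastLookup "mm_end_code" mm_list).getD 0))) = true
instance (mm_list : List (List (String × Int))) (pgmap_list : List (List (String × Int))) : Decidable (Pre_findOffset mm_list pgmap_list) := by unfold Pre_findOffset; infer_instance

def pvWitness_findOffset : (List (List (String × Int))) × (List (List (String × Int))) :=
  ([[("mm_start_code", 0), ("mm_end_code", 4096)]], [[], [("nr_pages", 1), ("vaddr", 100)]])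

def Spec_findOffset (mm_list : List (List (String × Int))) (pgmap_list : List (List (String × Int))) (out : Int × Int × Int) : Prop := out = findOffset_alt mm_list pgmap_list
instance (mm_list : List (List (String × Int))) (pgmap_list : List (List (String × Int))) (out : Int × Int × Int) : Decidable (Spec_findOffset mm_list pgmap_list out) := by unfold Spec_findOffset; infer_instance

-- ===== CLAIM (what is proved, stated in full; the proofs are below) =====
def Claim_equal_findOffset : Prop := ∀ (mm_list : List (List (String × Int))) (pgmap_list : List (List (String × Int))), Dom_findOffset mm_list pgmap_list → Pre_findOffset mm_list pgmap_list → Spec_findOffset mm_list pgmap_list (findOffset mm_list pgmap_list)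

-- ===== LEMMAS AND PROOFS =====

-- page weight of one pgmap entry and the offset list A's loop produces
def wt (d : List (String × Int)) : Int := 4096 * ((d.lookup "nr_pages").getD 0)

def mOffs (s e : Int) : Int → List (List (String × Int)) → List Int
  | _, [] => []
  | off, d :: ds => (if vaddrHit s e d then [off] else []) ++ mOffs s e (off + wt d) ds

theorem mOffs_cons (s e off : Int) (d : List (String × Int)) (ds : List (List (String × Int))) :
    mOffs s e off (d :: ds) = (if vaddrHit s e d then [off] else []) ++ mOffs s e (off + wt d) ds := rfl

theorem or_some (o : Option Int) (v : Int) : o.or (some v) = some (o.getD v) := by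
  cases o <;> rfl

theorem lookup_cons (k a : String) (b : Int) (d : List (String × Int)) :
    ((a, b) :: d).lookup k = if k = a then some b else d.lookup k := by
  rw [List.lookup]; split <;> simp_all

theorem lookup_none_iff (d : List (String × Int)) (k : String) :
    d.lookup k = none ↔ k ∉ d.map Prod.fst := by
  induction d with
  | nil => simp
  | cons p d ih =>
    rcases p with ⟨a, b⟩
    rw [lookup_cons]
    by_cases h : k = a <;> simp [h, ih]

theorem mm_keyfold (d : List (String × Int)) (ks : List String) (st : Option Int × Option Int) :
    ks.foldl (fun st key =>
      ((if key == "mm_start_code" then d.lookup key else st.1),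
       (if key == "mm_end_code" then d.lookup key else st.2))) st =
    ((if "mm_start_code" ∈ ks then d.lookup "mm_start_code" else st.1),
     (if "mm_end_code" ∈ ks then d.lookup "mm_end_code" else st.2)) := by
  induction ks generalizing st with
  | nil => simp
  | cons k ks ih =>
    rw [List.foldl_cons, ih]
    by_cases h1 : k = "mm_start_code" <;> by_cases h2 : k = "mm_end_code" <;>
      first
        | (simp [h1, h2]; split_ifs <;> simp_all)
        | simp [h1, h2]

theorem mmScan_eq (d : List (String × Int)) (st : Option Int × Option Int) :
    mmScan d st = ((d.lookup "mm_start_code").or st.1, (d.lookup "mm_end_code").or st.2) := by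
  unfold mmScan
  rw [mm_keyfold]
  have mem1 : ("mm_start_code" ∈ pyKeys d) ↔ "mm_start_code" ∈ d.map Prod.fst := by
    simp [pyKeys]
  have mem2 : ("mm_end_code" ∈ pyKeys d) ↔ "mm_end_code" ∈ d.map Prod.fst := by
    simp [pyKeys]
  cases h1 : d.lookup "mm_start_code" <;> cases h2 : d.lookup "mm_end_code" <;>
    have n1 := (lookup_none_iff d "mm_start_code") <;>
    have n2 := (lookup_none_iff d "mm_end_code") <;>
    simp_all [Option.or]

theorem lastFold (g : List (String × Int) → Option Int) :
    ∀ (ds : List (List (String × Int))) (s0 : Option Int),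
    ds.foldl (fun s d => (g d).or s) s0 = ((ds.filterMap g).getLast?).or s0 := by
  intro ds
  induction ds with
  | nil => simp
  | cons d ds ih =>
    intro s0
    rw [List.foldl_cons, ih]
    cases hgd : g d with
    | none => simp [hgd]
    | some v =>
      simp only [List.filterMap_cons, hgd, List.getLast?_cons]
      rw [Option.some_or, or_some, Option.some_or]

theorem vaddrScan_keys (d : List (String × Int)) (s e off : Int) (co : Option Int) :
    ∀ ks : List String,
    vaddrScan d (some s) (some e) off co ks =
      if "vaddr" ∈ ks then
        (match d.lookup "vaddr" with
         | some a => if s ≤ a ∧ a < e then some off else co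
         | none => co)
      else co := by
  intro ks
  induction ks with
  | nil => simp [vaddrScan]
  | cons k ks ih =>
    by_cases hk : k = "vaddr"
    · subst hk
      simp only [vaddrScan, beq_self_eq_true, if_true, List.mem_cons, true_or]
      cases d.lookup "vaddr" <;> simp
    · simp only [vaddrScan, beq_iff_eq, hk, if_false, ih, List.mem_cons]
      simp [Ne.symm hk]

theorem vaddrScan_eq (d : List (String × Int)) (s e off : Int) (co : Option Int) :
    vaddrScan d (some s) (some e) off co (pyKeys d) =
      if vaddrHit s e d then some off else co := by
  rw [vaddrScan_keys]
  have hmem : ("vaddr" ∈ pyKeys d) ↔ "vaddr" ∈ d.map Prod.fst := by simp [pyKeys]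
  cases h : d.lookup "vaddr" with
  | none =>
    have hnm : "vaddr" ∉ pyKeys d := by
      rw [hmem, ← lookup_none_iff]; exact h
    simp [hnm, vaddrHit, h]
  | some a =>
    have hm : "vaddr" ∈ pyKeys d := by
      rw [hmem]
      by_contra hc
      rw [← lookup_none_iff] at hc
      simp [h] at hc
    by_cases hr : s ≤ a ∧ a < e <;> simp_all [vaddrHit]

theorem aLoop (s e : Int) :
    ∀ (ds : List (List (String × Int))) (off : Int) (co : Option Int),
    ds.foldl (fun (st : Int × Option Int) d =>
        (st.1 + 4096 * ((d.lookup "nr_pages").getD 0),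
         vaddrScan d (some s) (some e) st.1 st.2 (pyKeys d))) (off, co) =
      (off + (ds.map wt).sum, (mOffs s e off ds).getLast?.or co) := by
  intro ds
  induction ds with
  | nil => simp [mOffs]
  | cons d ds ih =>
    intro off co
    rw [List.foldl_cons]
    show List.foldl _ (off + 4096 * ((d.lookup "nr_pages").getD 0),
        vaddrScan d (some s) (some e) off co (pyKeys d)) ds = _
    rw [vaddrScan_eq, ih, mOffs_cons]
    simp only [Prod.mk.injEq]
    constructor
    · simp [wt]; ring
    · by_cases h : vaddrHit s e d
      · simp only [h, if_true, List.singleton_append, List.getLast?_cons, wt]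
        rw [or_some, Option.some_or]
      · simp [h, wt]

-- ===== B-side lemmas =====
theorem firstKey_eq (key : String) :
    ∀ l : List (List (String × Int)), firstKey l key = (l.filterMap (·.lookup key)).head? := by
  intro l
  induction l with
  | nil => rfl
  | cons m ms ih =>
    cases h : m.lookup key with
    | none =>
      have hnm : key ∉ m.map Prod.fst := (lookup_none_iff m key).mp h
      simp [firstKey, hnm, h, ih]
    | some v =>
      have hm : key ∈ m.map Prod.fst := by
        by_contra hc
        rw [← lookup_none_iff] at hc
        simp [h] at hc
      simp [firstKey, hm, h]

theorem firstKey_reverse (key : String) (ms : List (List (String × Int))) :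
    firstKey ms.reverse key = lastLookup key ms := by
  rw [firstKey_eq, lastLookup, List.filterMap_reverse, List.head?_reverse]

theorem mOffs_append (s e : Int) :
    ∀ (xs ys : List (List (String × Int))) (off : Int),
    mOffs s e off (xs ++ ys) = mOffs s e off xs ++ mOffs s e (off + (xs.map wt).sum) ys := by
  intro xs
  induction xs with
  | nil => simp [mOffs]
  | cons d xs ih =>
    intro ys off
    rw [List.cons_append, mOffs_cons, mOffs_cons, ih]
    simp only [List.map_cons, List.sum_cons, List.append_assoc]
    ring_nf

theorem sum_wt (t : List (List (String × Int))) :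
    (t.map wt).sum = 4096 * (t.map (fun d => (d.lookup "nr_pages").getD 0)).sum := by
  induction t with
  | nil => simp
  | cons d t ih => simp [wt, ih]; ring

theorem scanB_eq (pg : List (List (String × Int))) (s e : Int) :
    ∀ i : Nat, scanB pg s e i = (mOffs s e 0 ((pg.drop 1).take i)).getLast? := by
  intro i
  induction i with
  | zero => simp [scanB, mOffs]
  | succ i ih =>
    have hds : (pg.drop 1)[i]? = pg[1 + i]? := List.getElem?_drop
    cases h : pg[i + 1]? with
    | none =>
      have hlen : pg.length ≤ i + 1 := by
        by_contra hc
        push_neg at hc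
        simp [List.getElem?_eq_getElem hc] at h
      have htake : (pg.drop 1).take (i + 1) = (pg.drop 1).take i := by
        rw [List.take_of_length_le, List.take_of_length_le] <;>
          simp [List.length_drop] <;> omega
      have hpm : ((pg[i + 1]?).getD []).lookup "vaddr" = none := by simp [h]
      rw [htake, ← ih]
      simp only [scanB, hpm]
    | some pm =>
      have hds' : (pg.drop 1)[i]? = some pm := by rw [hds, Nat.add_comm 1 i] at *; exact h
      have htake : (pg.drop 1).take (i + 1) = (pg.drop 1).take i ++ [pm] := by
        rw [List.take_succ, hds']; rfl
      rw [htake, mOffs_append]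
      simp only [scanB, h, Option.getD_some]
      cases hv : pm.lookup "vaddr" with
      | none =>
        have hhit : vaddrHit s e pm = false := by simp [vaddrHit, hv]
        simp [mOffs, hhit, ih]
      | some v =>
        by_cases hr : s ≤ v ∧ v < e
        · have hhit : vaddrHit s e pm = true := by simp [vaddrHit, hv, hr]
          simp only [hr, if_true, mOffs, hhit, List.append_nil, List.getLast?_append,
            List.getLast?_cons, List.getLast?_nil]
          rw [sum_wt]
          simp
        · have hhit : vaddrHit s e pm = false := by simp [vaddrHit, hv, hr]
          simp [mOffs, hhit, ih, hr]

theorem scanB_top (pg : List (List (String × Int))) (s e : Int) :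
    scanB pg s e (pg.length - 1) = (mOffs s e 0 (pg.drop 1)).getLast? := by
  rw [scanB_eq]
  congr 1
  rw [List.take_of_length_le]
  simp [List.length_drop]

-- ===== VERDICT (by name: the statement is the Claim_ definition above) =====
theorem findOffset_spec : Claim_equal_findOffset := by
  intro mm_list pgmap_list _hdom hpre
  obtain ⟨hs, he, _hnp, _hany⟩ := hpre
  obtain ⟨s, hs'⟩ := Option.isSome_iff_exists.mp hs
  obtain ⟨e, he'⟩ := Option.isSome_iff_exists.mp he
  unfold Spec_findOffset findOffset findOffset_alt
  have hp := PySem.List.foldl_prod_mk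
      (fun (a : Option Int) (d : List (String × Int)) => (d.lookup "mm_start_code").or a)
      (fun (a : Option Int) (d : List (String × Int)) => (d.lookup "mm_end_code").or a)
      mm_list none none
  have hmm : mm_list.foldl (fun st d => mmScan d st) (none, none) = (some s, some e) := by
    simp only [mmScan_eq]
    rw [show (fun (st : Option Int × Option Int) (d : List (String × Int)) =>
        ((d.lookup "mm_start_code").or st.1, (d.lookup "mm_end_code").or st.2)) =
        (fun (st : Option Int × Option Int) (d : List (String × Int)) =>
        ((fun (a : Option Int) (d : List (String × Int)) => (d.lookup "mm_start_code").or a) st.1 d,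
         (fun (a : Option Int) (d : List (String × Int)) => (d.lookup "mm_end_code").or a) st.2 d)) from rfl,
      hp, lastFold, lastFold]
    simp only [Option.or_none]
    exact Prod.mk.injEq .. ▸ ⟨hs', he'⟩
  rw [hmm]
  simp only
  rw [aLoop s e]
  rw [firstKey_reverse, firstKey_reverse, hs', he']
  simp only [Option.getD_some]
  rw [scanB_top]
  simp [Option.or_none]
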